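-- pv_equiv track=rewrite | github.com/jonas-kaufmann/gemstone-profiler-automate | postprocess_experiment.py | get_pmc_diff_from_list
-- ===== SOURCE A (Python) =====
-- REG_MAX = 2**32
--
-- def get_pmc_diff_from_list(pmc_vals):
--     overflows = 0
--     for i in range(1, len(pmc_vals)):
--         if pmc_vals[i] < pmc_vals[i - 1]:
--             # overflow!
--             overflows += 1
--     if not overflows:
--         return pmc_vals[-1] - pmc_vals[0]
--     else:
--         return REG_MAX - pmc_vals[0] + pmc_vals[-1] + REG_MAX * (overflows - 1)
-- ===== SOURCE B (Python) =====
-- REG_MAX = 2**32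
--
-- def get_pmc_diff_from_list(pmc_vals):
--     prev = pmc_vals[0]
--     total = 0
--     for cur in pmc_vals[1:]:
--         delta = cur - prev
--         if delta < 0:
--             delta += REG_MAX
--         total += delta
--         prev = cur
--     return total
-- ===== Notes on version B (the rewrite author's own statement) =====
-- stated objective: alternative
-- what changed: B accumulates overflow-masked per-step deltas in a running total instead of counting overflows in one pass and applying an endpoint closed form at the end.
import Mathlib
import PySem

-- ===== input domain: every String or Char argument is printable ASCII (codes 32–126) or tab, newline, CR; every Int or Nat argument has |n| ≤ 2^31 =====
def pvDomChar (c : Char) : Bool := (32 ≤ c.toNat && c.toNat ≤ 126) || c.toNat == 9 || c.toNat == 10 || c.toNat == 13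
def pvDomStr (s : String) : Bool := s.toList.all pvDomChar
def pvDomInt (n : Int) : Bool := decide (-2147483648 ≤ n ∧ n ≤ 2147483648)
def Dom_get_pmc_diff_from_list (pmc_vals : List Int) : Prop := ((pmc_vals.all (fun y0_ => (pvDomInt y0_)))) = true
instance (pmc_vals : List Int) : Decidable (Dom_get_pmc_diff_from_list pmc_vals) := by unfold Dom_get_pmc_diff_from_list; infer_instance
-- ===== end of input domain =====

-- B maintains a running total of overflow-masked adjacent deltas instead of counting
-- overflows and applying an endpoint closed form; same value, alternative decomposition.

def REG_MAX : Int := 2 ^ 32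

-- ===== PORT A =====
def get_pmc_diff_from_list (pmc_vals : List Int) : Int :=
  let overflows : Int :=
    (PySem.List.pyRange 1 pmc_vals.length 1).foldl
      (fun acc i =>
        if PySem.List.pyGetD pmc_vals i 0 < PySem.List.pyGetD pmc_vals (i - 1) 0 then acc + 1
        else acc) 0
  if overflows = 0 then
    PySem.List.pyGetD pmc_vals (-1) 0 - PySem.List.pyGetD pmc_vals 0 0
  else
    REG_MAX - PySem.List.pyGetD pmc_vals 0 0 + PySem.List.pyGetD pmc_vals (-1) 0
      + REG_MAX * (overflows - 1)

-- ===== PORT B =====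
def get_pmc_diff_from_list_alt (pmc_vals : List Int) : Int :=
  let prev := PySem.List.pyGetD pmc_vals 0 0
  ((PySem.List.slice pmc_vals (some 1) none).foldl
    (fun (st : Int × Int) cur =>
      let delta := cur - st.2
      let delta := if delta < 0 then delta + REG_MAX else delta
      (st.1 + delta, cur)) (0, prev)).1

-- ===== PRECONDITION & SPEC =====
-- Python A raises IndexError on the empty list (pmc_vals[-1]); B raises there too (pmc_vals[0]).
def Pre_get_pmc_diff_from_list (pmc_vals : List Int) : Prop := pmc_vals ≠ []
instance (pmc_vals : List Int) : Decidable (Pre_get_pmc_diff_from_list pmc_vals) := by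
  unfold Pre_get_pmc_diff_from_list; infer_instance

def pvWitness_get_pmc_diff_from_list : List Int := [5, 2, 7]

def Spec_get_pmc_diff_from_list (pmc_vals : List Int) (out : Int) : Prop := out = get_pmc_diff_from_list_alt pmc_vals
instance (pmc_vals : List Int) (out : Int) : Decidable (Spec_get_pmc_diff_from_list pmc_vals out) := by unfold Spec_get_pmc_diff_from_list; infer_instance

-- ===== CLAIM (what is proved, stated in full; the proofs are below) =====
def Claim_equal_get_pmc_diff_from_list : Prop := ∀ (pmc_vals : List Int), Dom_get_pmc_diff_from_list pmc_vals → Pre_get_pmc_diff_from_list pmc_vals → Spec_get_pmc_diff_from_list pmc_vals (get_pmc_diff_from_list pmc_vals)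

-- ===== LEMMAS AND PROOFS =====

-- overflow count of the chain p, xs[0], xs[1], …
def ovFrom (p : Int) : List Int → Int
  | [] => 0
  | c :: cs => (if c < p then 1 else 0) + ovFrom c cs

-- B's total: sum of masked deltas starting from prev = p
def maskSum (p : Int) : List Int → Int
  | [] => 0
  | c :: cs => (if c - p < 0 then c - p + REG_MAX else c - p) + maskSum c cs

-- A's index loop computes ovFrom over the suffix from j-1
theorem loopA (L : List Int) (n : Nat) :
    ∀ (j : Nat) (acc p : Int) (rest : List Int), 1 ≤ j → L.length - j = n →
    L.drop (j - 1) = p :: rest →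
    (PySem.List.pyRange (j : Int) (L.length : Int) 1).foldl
      (fun acc i =>
        if PySem.List.pyGetD L i 0 < PySem.List.pyGetD L (i - 1) 0 then acc + 1
        else acc) acc = acc + ovFrom p rest := by
  induction n with
  | zero =>
    intro j acc p rest hj hn hcons
    have hle : L.length ≤ j := by omega
    rw [PySem.List.pyRange_one_eq_nil (by exact_mod_cast hle)]
    have hlen := congrArg List.length hcons
    rw [List.length_drop] at hlen
    simp only [List.length_cons] at hlen
    have : rest = [] := List.eq_nil_of_length_eq_zero (by omega)
    rw [this]
    simp [List.foldl, ovFrom]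
  | succ m ih =>
    intro j acc p rest hj hn hcons
    have hjlt : j < L.length := by omega
    rw [PySem.List.pyRange_one_cons (by exact_mod_cast hjlt)]
    rw [List.foldl_cons]
    have hcast : (j : Int) + 1 = ((j + 1 : Nat) : Int) := by push_cast; ring
    have hdrop : L.drop (j - 1) = L[j - 1] :: L.drop j := by
      have h1 : j - 1 + 1 = j := by omega
      rw [List.drop_eq_getElem_cons (show j - 1 < L.length by omega), h1]
    have hdrop2 : L.drop j = L[j] :: L.drop (j + 1) := List.drop_eq_getElem_cons hjlt
    have hpr : L[j - 1] :: L.drop j = p :: rest := hdrop.symm.trans hcons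
    have hp : p = L[j - 1] := by injection hpr with h1 _; exact h1.symm
    have hr : rest = L.drop j := by injection hpr with _ h2; exact h2.symm
    rw [hcast, ih (j + 1) _ L[j] (L.drop (j + 1)) (by omega) (by omega)
        (by exact hdrop2)]
    have hij : PySem.List.pyGetD L (j : Int) 0 = L[j] := by
      rw [PySem.List.pyGetD_natCast]; simp [List.getD, hjlt]
    have hcast2 : (j : Int) - 1 = ((j - 1 : Nat) : Int) := by omega
    have hij1 : PySem.List.pyGetD L ((j : Int) - 1) 0 = L[j - 1] := by
      rw [hcast2, PySem.List.pyGetD_natCast]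
      simp [List.getD, show j - 1 < L.length by omega]
    rw [hij, hij1, hp, hr, hdrop2]
    simp only [ovFrom]
    split <;> ring

-- B's fold computes maskSum (first component)
theorem loopB (xs : List Int) : ∀ (p t : Int),
    (xs.foldl
      (fun (st : Int × Int) cur =>
        (st.1 + (if cur - st.2 < 0 then cur - st.2 + REG_MAX else cur - st.2), cur)) (t, p)).1
      = t + maskSum p xs := by
  induction xs with
  | nil => intro p t; simp [maskSum]
  | cons c cs ih =>
    intro p t
    simp only [List.foldl_cons, maskSum, ih]
    ring

-- the telescoping identity: masked-delta sum = REG_MAX·overflows + last − first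
theorem maskSum_eq (xs : List Int) : ∀ (p : Int),
    maskSum p xs = REG_MAX * ovFrom p xs + xs.getLastD p - p := by
  induction xs with
  | nil => intro p; simp [maskSum, ovFrom]
  | cons c cs ih =>
    intro p
    rw [maskSum, ih c]
    simp only [ovFrom]
    have hl : (c :: cs).getLastD p = cs.getLastD c := by
      cases cs <;> simp [List.getLastD]
    rw [hl]
    have hiff : (if c - p < 0 then c - p + REG_MAX else c - p)
        = (if c < p then c - p + REG_MAX else c - p) := by
      simp [sub_neg]
    rw [hiff]
    split <;> ring

-- ===== VERDICT (by name: the statement is the Claim_ definition above) =====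
theorem get_pmc_diff_from_list_spec : Claim_equal_get_pmc_diff_from_list := by
  intro pmc_vals _ hpre
  unfold Spec_get_pmc_diff_from_list
  obtain ⟨x, xs, rfl⟩ := List.exists_cons_of_ne_nil hpre
  unfold get_pmc_diff_from_list get_pmc_diff_from_list_alt
  rw [PySem.List.slice_from_one]
  simp only [List.tail_cons]
  rw [loopB xs (PySem.List.pyGetD (x :: xs) 0 0) 0]
  have h1 : PySem.List.pyGetD (x :: xs) 0 0 = x := PySem.List.pyGetD_zero_cons x xs 0
  have hlast : PySem.List.pyGetD (x :: xs) (-1) 0 = xs.getLastD x := by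
    rw [PySem.List.pyGetD_neg_one (x :: xs) 0 (by simp)]
    exact List.getLast_eq_getLastD ..
  have hloop :
      (PySem.List.pyRange ((1 : Nat) : Int) ((x :: xs).length : Int) 1).foldl
        (fun acc i =>
          if PySem.List.pyGetD (x :: xs) i 0 < PySem.List.pyGetD (x :: xs) (i - 1) 0 then acc + 1
          else acc) 0 = 0 + ovFrom x xs :=
    loopA (x :: xs) ((x :: xs).length - 1) 1 0 x xs (by omega) rfl (by simp)
  simp only [Nat.cast_one, zero_add] at hloop
  rw [hloop, h1, hlast, maskSum_eq xs x]
  split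
  · rename_i h0
    rw [h0]; ring
  · ring
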